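-- pv_equiv track=rewrite | github.com/hapi2test/fuzz | GArandom/bound.py | inter_bound
-- ===== SOURCE A (Python) =====
-- def inter_bound(result1, result2, result3):
--     intersection_result = {}
--
--     # 获取三个结果中的所有参数（包括非公共参数）
--     all_params = set(result1.keys()) | set(result2.keys()) | set(result3.keys())
--
--     # 遍历每个参数
--     for param in all_params:
--         bounds1 = result1.get(param, None)
--         bounds2 = result2.get(param, None)
--         bounds3 = result3.get(param, None)
--
--         # 存在该参数时，计算范围交集
--         if bounds1 and bounds2 and bounds3:
--             combined_intersections = []
--             for bound1 in bounds1: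
--                 for bound2 in bounds2:
--                     for bound3 in bounds3:
--                         # 计算三个bound的交集，按最大下限和最小上限取值
--                         lower_bound = max(bound1[0], bound2[0], bound3[0])
--                         upper_bound = min(bound1[1], bound2[1], bound3[1])
--
--                         # 交集有效时，加入结果
--                         if lower_bound <= upper_bound:
--                             combined_intersections.append((lower_bound, upper_bound))
--
--             # 如果有有效交集，更新结果为交集，否则保留原值
--             if combined_intersections:
--                 intersection_result[param] = combined_intersections
--             else:
--                 # 如果没有有效交集，保留第一个result的范围
--                 intersection_result[param] = bounds1
--
--         # 如果某个参数不在其中某个result中，保留已有的范围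
--         elif bounds1:
--             intersection_result[param] = bounds1
--         elif bounds2:
--             intersection_result[param] = bounds2
--         elif bounds3:
--             intersection_result[param] = bounds3
--
--     return intersection_result
-- ===== SOURCE B (Python) =====
-- def _isect(xs, ys):
--     # pairwise interval intersection, xs outer / ys inner, invalid pairs dropped
--     return [(max(x0, y0), min(x1, y1))
--             for x0, x1 in xs for y0, y1 in ys
--             if max(x0, y0) <= min(x1, y1)]
--
--
-- def inter_bound(result1, result2, result3):
--     # Collect every parameter once (first occurrence across the three dicts),
--     # then map each parameter to its value: the nonempty bounds lists present
--     # are folded through pairwise intersection when all three are present,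
--     # falling back to the first one when the intersection is empty; otherwise
--     # the first nonempty bounds list wins.
--     seen = set()
--     keys = []
--     for d in (result1, result2, result3):
--         for k in d:
--             if k not in seen:
--                 seen.add(k)
--                 keys.append(k)
--     out = {}
--     for param in keys:
--         present = [b for b in (result1.get(param), result2.get(param),
--                                result3.get(param)) if b]
--         if not present:
--             continue
--         if len(present) == 3:
--             inter = present[0]
--             for bs in present[1:]:
--                 inter = _isect(inter, bs)
--             out[param] = inter if inter else present[0]
--         else:
--             out[param] = present[0]
--     return out
-- ===== Notes on version B (the rewrite author's own statement) =====
-- stated objective: alternative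
-- what changed: Instead of A's fold over a key set with a triple nested loop and an elif chain per key, B first collects the keys into an ordered list, then maps each key to a value computed from the filtered list of present bounds: a left fold of pairwise interval intersections (b1*b2 then *b3) replaces the triple loop, and 'first nonempty wins' replaces the elif chain.
import Mathlib
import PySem

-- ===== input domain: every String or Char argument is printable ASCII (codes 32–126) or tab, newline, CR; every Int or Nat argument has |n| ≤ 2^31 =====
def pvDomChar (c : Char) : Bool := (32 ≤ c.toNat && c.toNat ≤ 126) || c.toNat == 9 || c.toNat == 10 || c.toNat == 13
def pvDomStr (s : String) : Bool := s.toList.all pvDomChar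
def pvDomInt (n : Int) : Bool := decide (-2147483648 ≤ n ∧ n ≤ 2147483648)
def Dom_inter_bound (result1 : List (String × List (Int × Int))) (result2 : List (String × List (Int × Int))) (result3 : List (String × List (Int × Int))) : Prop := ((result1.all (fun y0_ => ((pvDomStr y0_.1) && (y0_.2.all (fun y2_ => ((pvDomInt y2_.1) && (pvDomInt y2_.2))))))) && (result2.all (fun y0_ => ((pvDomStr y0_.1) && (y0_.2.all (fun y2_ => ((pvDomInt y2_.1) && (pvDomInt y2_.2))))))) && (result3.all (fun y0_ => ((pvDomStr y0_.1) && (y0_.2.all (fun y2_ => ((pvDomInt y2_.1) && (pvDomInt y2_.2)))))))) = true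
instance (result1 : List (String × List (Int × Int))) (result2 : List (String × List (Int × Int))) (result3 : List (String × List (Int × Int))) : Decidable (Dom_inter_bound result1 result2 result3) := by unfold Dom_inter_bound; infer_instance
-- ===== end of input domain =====

-- B replaces A's fold over a key set (triple loop + elif chain per key) by an
-- ordered key collection followed by a map: per key a fold of pairwise interval
-- intersections over the filtered present bounds ('alternative', same cost).
-- The output dict is compared as a mapping, so Python's set hash order is
-- modelled as deterministic first-occurrence order on both sides.

-- ===== PORT A =====
-- `d.get(param, None)` followed by Python truthiness — None and [] are both falsy
def pvGetB (r : List (String × List (Int × Int))) (p : String) : List (Int × Int) :=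
  (List.lookup p r).getD []

-- set(result1.keys()) | set(result2.keys()) | set(result3.keys())
def pvAllParams (result1 result2 result3 : List (String × List (Int × Int))) : PySem.Set String :=
  PySem.Set.union (PySem.Set.union (PySem.Set.ofList (result1.map Prod.fst)) (result2.map Prod.fst)) (result3.map Prod.fst)

-- the triple nested loop of A (max(a,b,c) = max(max(a,b),c), min likewise)
def pvTriple (b1 b2 b3 : List (Int × Int)) : List (Int × Int) :=
  b1.foldl (fun acc x =>
    b2.foldl (fun acc y =>
      b3.foldl (fun acc z =>
        if max (max x.1 y.1) z.1 ≤ min (min x.2 y.2) z.2 then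
          acc ++ [(max (max x.1 y.1) z.1, min (min x.2 y.2) z.2)]
        else acc) acc) acc) []

-- one iteration of A's `for param in all_params` loop; each param occurs once in the
-- set, so `intersection_result[param] = v` is an append of a fresh key.
def pvStepA (result1 result2 result3 : List (String × List (Int × Int)))
    (acc : List (String × List (Int × Int))) (param : String) : List (String × List (Int × Int)) :=
  let b1 := pvGetB result1 param
  let b2 := pvGetB result2 param
  let b3 := pvGetB result3 param
  if b1 ≠ [] ∧ b2 ≠ [] ∧ b3 ≠ [] then
    let ci := pvTriple b1 b2 b3
    if ci ≠ [] then acc ++ [(param, ci)] else acc ++ [(param, b1)]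
  else if b1 ≠ [] then acc ++ [(param, b1)]
  else if b2 ≠ [] then acc ++ [(param, b2)]
  else if b3 ≠ [] then acc ++ [(param, b3)]
  else acc

def inter_bound (result1 : List (String × List (Int × Int))) (result2 : List (String × List (Int × Int))) (result3 : List (String × List (Int × Int))) : List (String × List (Int × Int)) :=
  (pvAllParams result1 result2 result3).foldl (pvStepA result1 result2 result3) []

-- ===== PORT B =====
-- Source B's _isect: one pairwise-intersection comprehension
def pvIsect (xs ys : List (Int × Int)) : List (Int × Int) :=
  xs.flatMap (fun x => ys.filterMap (fun y =>
    if max x.1 y.1 ≤ min x.2 y.2 then some (max x.1 y.1, min x.2 y.2) else none))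

-- Source B's key-collection loop: `seen` set plus ordered `keys` list
def pvCollectKeys (rs : List (List (String × List (Int × Int)))) : List String :=
  (rs.foldl (fun st d => d.foldl (fun st kv =>
      if PySem.Set.contains st.1 kv.1 then st
      else (PySem.Set.add st.1 kv.1, st.2 ++ [kv.1])) st)
    ((PySem.Set.empty : PySem.Set String), ([] : List String))).2

-- Source B's per-param value: filter the present bounds, fold pairwise intersections
def pvValueB (b1 b2 b3 : List (Int × Int)) : Option (List (Int × Int)) :=
  match ([b1, b2, b3].filter (fun b => !b.isEmpty)) with
  | [] => none
  | h :: t =>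
    if t.length == 2 then
      let inter := t.foldl pvIsect h
      some (if !inter.isEmpty then inter else h)
    else some h

def inter_bound_alt (result1 : List (String × List (Int × Int))) (result2 : List (String × List (Int × Int))) (result3 : List (String × List (Int × Int))) : List (String × List (Int × Int)) :=
  (pvCollectKeys [result1, result2, result3]).filterMap (fun param =>
    (pvValueB (PySem.Dict.getD ⟨result1⟩ param []) (PySem.Dict.getD ⟨result2⟩ param [])
       (PySem.Dict.getD ⟨result3⟩ param [])).map (fun v => (param, v)))

-- ===== PRECONDITION & SPEC =====
def Spec_inter_bound (result1 : List (String × List (Int × Int))) (result2 : List (String × List (Int × Int))) (result3 : List (String × List (Int × Int))) (out : List (String × List (Int × Int))) : Prop := out = inter_bound_alt result1 result2 result3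
instance (result1 : List (String × List (Int × Int))) (result2 : List (String × List (Int × Int))) (result3 : List (String × List (Int × Int))) (out : List (String × List (Int × Int))) : Decidable (Spec_inter_bound result1 result2 result3 out) := by unfold Spec_inter_bound; infer_instance

-- ===== CLAIM (what is proved, stated in full; the proofs are below) =====
def Claim_equal_inter_bound : Prop := ∀ (result1 : List (String × List (Int × Int))) (result2 : List (String × List (Int × Int))) (result3 : List (String × List (Int × Int))), Dom_inter_bound result1 result2 result3 → Spec_inter_bound result1 result2 result3 (inter_bound result1 result2 result3)

-- ===== LEMMAS AND PROOFS =====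

theorem pvIsect_nil (ys : List (Int × Int)) : pvIsect [] ys = [] := by
  simp [pvIsect]

theorem pvIsect_one' (i : Int × Int) (ys : List (Int × Int)) :
    pvIsect [i] ys
      = ys.filterMap (fun z => if max i.1 z.1 ≤ min i.2 z.2 then some (max i.1 z.1, min i.2 z.2) else none) := by
  simp [pvIsect]

theorem pvIsect_one (a b : Int) (ys : List (Int × Int)) :
    pvIsect [(a, b)] ys
      = ys.filterMap (fun z => if max a z.1 ≤ min b z.2 then some (max a z.1, min b z.2) else none) := by
  simp [pvIsect]

theorem pvIsect_cons' (i : Int × Int) (xs ys : List (Int × Int)) :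
    pvIsect (i :: xs) ys = pvIsect [i] ys ++ pvIsect xs ys := by
  simp [pvIsect]

theorem pvIsect_append (u v ys : List (Int × Int)) :
    pvIsect (u ++ v) ys = pvIsect u ys ++ pvIsect v ys := by
  simp [pvIsect]

-- the innermost b3-loop of A equals one pairwise pass over b3 from the (x,y) pair,
-- and contributes nothing when the (x,y) pair is already empty
theorem pvInner3 (x y : Int × Int) (b3 acc : List (Int × Int)) :
    b3.foldl (fun acc z =>
        if max (max x.1 y.1) z.1 ≤ min (min x.2 y.2) z.2 then
          acc ++ [(max (max x.1 y.1) z.1, min (min x.2 y.2) z.2)]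
        else acc) acc
      = acc ++ (if max x.1 y.1 ≤ min x.2 y.2 then
          pvIsect [(max x.1 y.1, min x.2 y.2)] b3 else []) := by
  induction b3 generalizing acc with
  | nil =>
    by_cases h12 : max x.1 y.1 ≤ min x.2 y.2
    · rw [List.foldl_nil, if_pos h12, pvIsect_one, List.filterMap_nil, List.append_nil]
    · rw [List.foldl_nil, if_neg h12, List.append_nil]
  | cons z tl ih =>
    rw [List.foldl_cons, ih]
    by_cases h3 : max (max x.1 y.1) z.1 ≤ min (min x.2 y.2) z.2
    · have h12 : max x.1 y.1 ≤ min x.2 y.2 := by omega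
      rw [if_pos h3, if_pos h12, if_pos h12, pvIsect_one, pvIsect_one,
        List.filterMap_cons_some (by rw [if_pos h3]), List.append_assoc,
        List.singleton_append]
    · rw [if_neg h3]
      by_cases h12 : max x.1 y.1 ≤ min x.2 y.2
      · rw [if_pos h12, if_pos h12, pvIsect_one, pvIsect_one,
          List.filterMap_cons_none (by rw [if_neg h3])]
      · rw [if_neg h12, if_neg h12]

-- the middle b2-loop's contributions equal the two pairwise passes started from [x]
theorem pvFlatMid (x : Int × Int) (b2 b3 : List (Int × Int)) :
    b2.flatMap (fun y => if max x.1 y.1 ≤ min x.2 y.2 then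
        pvIsect [(max x.1 y.1, min x.2 y.2)] b3 else [])
      = pvIsect (pvIsect [x] b2) b3 := by
  induction b2 with
  | nil => rw [List.flatMap_nil, pvIsect_one', List.filterMap_nil, pvIsect_nil]
  | cons y tl ih =>
    by_cases h12 : max x.1 y.1 ≤ min x.2 y.2
    · rw [List.flatMap_cons, ih, if_pos h12, pvIsect_one' x (y :: tl),
        List.filterMap_cons_some (by rw [if_pos h12]), pvIsect_one' x tl,
        pvIsect_cons' (max x.1 y.1, min x.2 y.2)
          (List.filterMap
            (fun z => if max x.1 z.1 ≤ min x.2 z.2 then some (max x.1 z.1, min x.2 z.2) else none) tl) b3]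
    · rw [List.flatMap_cons, ih, if_neg h12, List.nil_append, pvIsect_one' x (y :: tl),
        List.filterMap_cons_none (by rw [if_neg h12]), pvIsect_one' x tl]

-- summing the per-x contributions over b1 gives B's composed pairwise passes
theorem pvFlatTop (b1 b2 b3 : List (Int × Int)) :
    b1.flatMap (fun x => pvIsect (pvIsect [x] b2) b3) = pvIsect (pvIsect b1 b2) b3 := by
  induction b1 with
  | nil => rw [List.flatMap_nil, pvIsect_nil, pvIsect_nil]
  | cons x tl ih =>
    rw [List.flatMap_cons, ih, pvIsect_cons' x tl b2, pvIsect_append]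

-- A's triple loop = B's two pairwise passes
theorem pvTriple_eq_isect (b1 b2 b3 : List (Int × Int)) :
    pvTriple b1 b2 b3 = pvIsect (pvIsect b1 b2) b3 := by
  unfold pvTriple
  simp only [pvInner3]
  simp only [PySem.List.foldl_append_eq_flatMap, List.nil_append]
  rw [List.flatMap_congr (g := fun x => pvIsect (pvIsect [x] b2) b3)
    (fun x _ => pvFlatMid x b2 b3), pvFlatTop]

-- B's seen/keys pair stays two copies of the same list, evolving by Set.add
theorem pvCollect_inner (ks : List String) (s : List String) :
    ks.foldl (fun (st : PySem.Set String × List String) k =>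
        if PySem.Set.contains st.1 k then st
        else (PySem.Set.add st.1 k, st.2 ++ [k])) (s, s)
      = (ks.foldl PySem.Set.add s, ks.foldl PySem.Set.add s) := by
  induction ks generalizing s with
  | nil => rfl
  | cons k tl ih =>
    rw [List.foldl_cons, List.foldl_cons]
    by_cases h : PySem.Set.contains s k
    · have hm : k ∈ s := by simpa [PySem.Set.contains] using h
      rw [if_pos h, show PySem.Set.add s k = s from by simp [PySem.Set.add, PySem.Set.contains, hm]]
      exact ih s
    · have hm : k ∉ s := by simpa [PySem.Set.contains] using h
      rw [if_neg h, show PySem.Set.add s k = s ++ [k] from by simp [PySem.Set.add, PySem.Set.contains, hm]]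
      exact ih (s ++ [k])

-- the inner per-dict loop only reads each entry's key
theorem pvCollect_dict (d : List (String × List (Int × Int))) (st : PySem.Set String × List String) :
    d.foldl (fun st kv =>
        if PySem.Set.contains st.1 kv.1 then st
        else (PySem.Set.add st.1 kv.1, st.2 ++ [kv.1])) st
      = (d.map Prod.fst).foldl (fun st k =>
          if PySem.Set.contains st.1 k then st
          else (PySem.Set.add st.1 k, st.2 ++ [k])) st := by
  rw [List.foldl_map]

-- the key-collection loop computes exactly A's set union
theorem pvCollectKeys_eq (result1 result2 result3 : List (String × List (Int × Int))) :
    pvCollectKeys [result1, result2, result3] = pvAllParams result1 result2 result3 := by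
  unfold pvCollectKeys pvAllParams
  simp only [List.foldl_cons, List.foldl_nil]
  rw [pvCollect_dict, pvCollect_dict, pvCollect_dict,
    show ((PySem.Set.empty : PySem.Set String), ([] : List String)) = (([] : List String), ([] : List String)) from rfl,
    pvCollect_inner, pvCollect_inner, pvCollect_inner]
  rfl

-- PySem.Dict.getD with default [] is A's lookup-with-default
theorem pvGetD_eq (r : List (String × List (Int × Int))) (p : String) :
    PySem.Dict.getD ⟨r⟩ p [] = pvGetB r p := by
  unfold PySem.Dict.getD PySem.Dict.get? pvGetB
  induction r with
  | nil => rfl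
  | cons kv tl ih =>
    by_cases h : kv.1 = p
    · simp [List.find?, List.lookup, h]
    · have h' : (kv.1 == p) = false := by simpa using h
      have h'' : (p == kv.1) = false := by simpa using (fun e => h e.symm)
      simpa [PySem.Dict.items, List.find?, List.lookup, h', h''] using ih

-- one step of A's loop appends exactly B's per-key contribution
theorem pvStep_eq_value (result1 result2 result3 : List (String × List (Int × Int)))
    (acc : List (String × List (Int × Int))) (param : String) :
    pvStepA result1 result2 result3 acc param
      = acc ++ ((pvValueB (PySem.Dict.getD ⟨result1⟩ param []) (PySem.Dict.getD ⟨result2⟩ param [])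
          (PySem.Dict.getD ⟨result3⟩ param [])).map (fun v => (param, v))).toList := by
  rw [pvGetD_eq, pvGetD_eq, pvGetD_eq]
  unfold pvStepA pvValueB
  rcases h1 : pvGetB result1 param with _ | ⟨x1, t1⟩ <;>
    rcases h2 : pvGetB result2 param with _ | ⟨x2, t2⟩ <;>
      rcases h3 : pvGetB result3 param with _ | ⟨x3, t3⟩ <;>
        simp [List.filter, pvTriple_eq_isect] <;>
        split_ifs <;>
        simp_all

-- A's whole fold = B's filterMap over the same key list
theorem pvFold_eq_filterMap (result1 result2 result3 : List (String × List (Int × Int)))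
    (ks : List String) (acc : List (String × List (Int × Int))) :
    ks.foldl (pvStepA result1 result2 result3) acc
      = acc ++ ks.filterMap (fun param =>
          (pvValueB (PySem.Dict.getD ⟨result1⟩ param []) (PySem.Dict.getD ⟨result2⟩ param [])
             (PySem.Dict.getD ⟨result3⟩ param [])).map (fun v => (param, v))) := by
  induction ks generalizing acc with
  | nil => simp
  | cons k tl ih =>
    rw [List.foldl_cons, ih, pvStep_eq_value, List.filterMap_cons]
    cases (pvValueB (PySem.Dict.getD ⟨result1⟩ k []) (PySem.Dict.getD ⟨result2⟩ k [])
        (PySem.Dict.getD ⟨result3⟩ k [])).map (fun v => (k, v)) <;> simp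

theorem inter_bound_eq_alt (result1 result2 result3 : List (String × List (Int × Int))) :
    inter_bound result1 result2 result3 = inter_bound_alt result1 result2 result3 := by
  rw [inter_bound, inter_bound_alt, pvCollectKeys_eq, pvFold_eq_filterMap, List.nil_append]

-- ===== VERDICT (by name: the statement is the Claim_ definition above) =====
theorem inter_bound_spec : Claim_equal_inter_bound := by
  intro result1 result2 result3 _dom
  unfold Spec_inter_bound
  exact inter_bound_eq_alt result1 result2 result3
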